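-- pv_equiv track=rewrite | github.com/markxio/TEASBench | TTS-Benchmark/inference_systems/eval_aimo_toolless_9.py | aggregate_generation_stats_per_question
-- ===== SOURCE A (Python) =====
-- from typing import Any, Dict, List, Optional, Tuple
--
-- def aggregate_generation_stats_per_question(meta_list: List[Dict[str, Any]]) -> Dict[str, Any]:
--     """
--     Aggregate per-generation meta dicts (one per attempt) into per-question statistics.
--
--     Expected keys per element:
--       - prompt_len_tokens
--       - output_len_tokens
--
--     Returns:
--       - num_generations
--       - total_prompt_len_tokens_all_generations
--       - total_output_len_tokens_all_generations
--       - max_prompt_len_tokens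
--       - max_output_len_tokens
--     """
--
--     def _to_int(x: Any, default: int = 0) -> int:
--         try:
--             if x is None:
--                 return default
--             return int(x)
--         except Exception:
--             return default
--
--     total_prompt = 0
--     total_output = 0
--     max_prompt: Optional[int] = None
--     max_output: Optional[int] = None
--
--     for m in meta_list or []:
--         p = _to_int(m.get("prompt_len_tokens"), 0)
--         o = _to_int(m.get("output_len_tokens"), 0)
--
--         total_prompt += p
--         total_output += o
--
--         max_prompt = p if max_prompt is None else max(max_prompt, p)
--         max_output = o if max_output is None else max(max_output, o)
--
--     return {
--         "num_generations": len(meta_list or []),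
--         "total_prompt_len_tokens_all_generations": total_prompt,
--         "total_output_len_tokens_all_generations": total_output,
--         "max_prompt_len_tokens": max_prompt,
--         "max_output_len_tokens": max_output,
--     }
-- ===== SOURCE B (Python) =====
-- def aggregate_generation_stats_per_question(meta_list):
--     def _to_int(x, default=0):
--         try:
--             if x is None:
--                 return default
--             return int(x)
--         except Exception:
--             return default
--
--     def _merge_max(a, b):
--         if a is None:
--             return b
--         if b is None:
--             return a
--         return max(a, b)
--
--     def _stats(ms):
--         # divide and conquer: stats of a slice = merge of the stats of its halves
--         if not ms:
--             return (0, 0, 0, None, None)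
--         if len(ms) == 1:
--             m = ms[0]
--             p = _to_int(m.get("prompt_len_tokens"), 0)
--             o = _to_int(m.get("output_len_tokens"), 0)
--             return (1, p, o, p, o)
--         mid = len(ms) // 2
--         ln, lp, lo, lmp, lmo = _stats(ms[:mid])
--         rn, rp, ro, rmp, rmo = _stats(ms[mid:])
--         return (ln + rn, lp + rp, lo + ro, _merge_max(lmp, rmp), _merge_max(lmo, rmo))
--
--     n, tp, to, mp, mo = _stats(list(meta_list or []))
--     return {
--         "num_generations": n,
--         "total_prompt_len_tokens_all_generations": tp,
--         "total_output_len_tokens_all_generations": to,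
--         "max_prompt_len_tokens": mp,
--         "max_output_len_tokens": mo,
--     }
-- ===== Notes on version B (the rewrite author's own statement) =====
-- stated objective: alternative
-- what changed: Replaced A's single forward loop with four interleaved running accumulators by a divide-and-conquer recursion: the list is split in halves, each half's (count, sums, optional maxima) tuple is computed recursively, and the two tuples are combined with an associative merge; correct because count/sum/max form commutative monoids.
import Mathlib
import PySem

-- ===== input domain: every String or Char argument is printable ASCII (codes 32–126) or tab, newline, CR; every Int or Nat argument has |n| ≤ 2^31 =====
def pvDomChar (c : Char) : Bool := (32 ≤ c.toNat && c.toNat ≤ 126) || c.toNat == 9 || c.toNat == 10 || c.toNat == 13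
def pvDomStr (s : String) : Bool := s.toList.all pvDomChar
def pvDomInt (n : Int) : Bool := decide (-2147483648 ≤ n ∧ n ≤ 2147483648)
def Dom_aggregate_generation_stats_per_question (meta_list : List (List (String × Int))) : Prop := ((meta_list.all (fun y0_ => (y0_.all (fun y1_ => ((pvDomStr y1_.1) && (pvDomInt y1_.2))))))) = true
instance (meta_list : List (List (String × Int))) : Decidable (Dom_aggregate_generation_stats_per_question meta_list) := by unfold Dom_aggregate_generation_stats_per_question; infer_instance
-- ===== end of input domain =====

-- B replaces A's single forward loop with interleaved accumulators by a divide-and-conquer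
-- recursion combining half-stats with an associative merge (alternative decomposition, same O(n)).

-- ===== PORT A =====
-- _to_int(m.get(k), 0): values are already ints, so this is the dict lookup with default 0
def pvGetTok (m : List (String × Int)) (k : String) : Int :=
  (PySem.Dict.mk m).getD k 0

def aggregate_generation_stats_per_question (meta_list : List (List (String × Int))) : List (String × Option Int) :=
  let st := meta_list.foldl
    (fun (st : Int × Int × Option Int × Option Int) m =>
      let p := pvGetTok m "prompt_len_tokens"
      let o := pvGetTok m "output_len_tokens"
      (st.1 + p, st.2.1 + o,
       match st.2.2.1 with | none => some p | some mp => some (max mp p),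
       match st.2.2.2 with | none => some o | some mo => some (max mo o)))
    (0, 0, none, none)
  [("num_generations", some (meta_list.length : Int)),
   ("total_prompt_len_tokens_all_generations", some st.1),
   ("total_output_len_tokens_all_generations", some st.2.1),
   ("max_prompt_len_tokens", st.2.2.1),
   ("max_output_len_tokens", st.2.2.2)]

-- ===== PORT B =====
-- _merge_max: None is the identity, otherwise Python's max on ints
def pvMergeMax (a b : Option Int) : Option Int :=
  match a with
  | none => b
  | some x => match b with
              | none => some x
              | some y => some (max x y)

-- _stats: divide-and-conquer; ms[:mid] / ms[mid:] with 0 ≤ mid ≤ len are exactly take/drop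
def pvStats (ms : List (List (String × Int))) : Int × Int × Int × Option Int × Option Int :=
  match ms with
  | [] => (0, 0, 0, none, none)
  | [m] =>
    let p := pvGetTok m "prompt_len_tokens"
    let o := pvGetTok m "output_len_tokens"
    (1, p, o, some p, some o)
  | x :: y :: rest =>
    let ms := x :: y :: rest
    let mid := ms.length / 2
    let l := pvStats (ms.take mid)
    let r := pvStats (ms.drop mid)
    (l.1 + r.1, l.2.1 + r.2.1, l.2.2.1 + r.2.2.1,
     pvMergeMax l.2.2.2.1 r.2.2.2.1, pvMergeMax l.2.2.2.2 r.2.2.2.2)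
termination_by ms.length
decreasing_by
  · simp [List.length_take]; omega
  · simp [List.length_drop]; omega

def aggregate_generation_stats_per_question_alt (meta_list : List (List (String × Int))) : List (String × Option Int) :=
  let st := pvStats meta_list
  [("num_generations", some st.1),
   ("total_prompt_len_tokens_all_generations", some st.2.1),
   ("total_output_len_tokens_all_generations", some st.2.2.1),
   ("max_prompt_len_tokens", st.2.2.2.1),
   ("max_output_len_tokens", st.2.2.2.2)]

-- ===== PRECONDITION & SPEC =====
def Spec_aggregate_generation_stats_per_question (meta_list : List (List (String × Int))) (out : List (String × Option Int)) : Prop := out = aggregate_generation_stats_per_question_alt meta_list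
instance (meta_list : List (List (String × Int))) (out : List (String × Option Int)) : Decidable (Spec_aggregate_generation_stats_per_question meta_list out) := by unfold Spec_aggregate_generation_stats_per_question; infer_instance

-- ===== CLAIM (what is proved, stated in full; the proofs are below) =====
def Claim_equal_aggregate_generation_stats_per_question : Prop := ∀ (meta_list : List (List (String × Int))), Dom_aggregate_generation_stats_per_question meta_list → Spec_aggregate_generation_stats_per_question meta_list (aggregate_generation_stats_per_question meta_list)

-- ===== LEMMAS AND PROOFS =====
-- shared characterisation of both programs' result
def pvP (m : List (String × Int)) : Int := pvGetTok m "prompt_len_tokens"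
def pvO (m : List (String × Int)) : Int := pvGetTok m "output_len_tokens"
def pvMaxO (l : List Int) : Option Int :=
  match l with
  | [] => none
  | h :: t => some (t.foldl max h)

theorem foldl_max_max (l : List Int) (a b : Int) :
    l.foldl max (max a b) = max a (l.foldl max b) := by
  induction l generalizing b with
  | nil => simp
  | cons c cs ih => simp only [List.foldl_cons, max_assoc, ih]

theorem pvMaxO_append (a b : List Int) : pvMaxO (a ++ b) = pvMergeMax (pvMaxO a) (pvMaxO b) := by
  cases a with
  | nil => cases b <;> simp [pvMaxO, pvMergeMax]
  | cons x xs =>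
    cases b with
    | nil => simp [pvMaxO, pvMergeMax]
    | cons y ys =>
      simp only [pvMaxO, pvMergeMax, List.cons_append, Option.some.injEq]
      rw [List.foldl_append, List.foldl_cons, foldl_max_max]

theorem pvStats_char (ms : List (List (String × Int))) :
    pvStats ms = ((ms.length : Int), (ms.map pvP).sum, (ms.map pvO).sum,
                  pvMaxO (ms.map pvP), pvMaxO (ms.map pvO)) := by
  induction ms using pvStats.induct with
  | case1 => simp [pvStats, pvMaxO]
  | case2 m => simp [pvStats, pvMaxO, pvP, pvO]
  | case3 x y rest ms mid ihl ihr =>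
    rw [pvStats, ihl, ihr]
    simp only [ms, mid]
    simp only [Prod.mk.injEq]
    have htd : List.take ((x :: y :: rest).length / 2) (x :: y :: rest) ++
        List.drop ((x :: y :: rest).length / 2) (x :: y :: rest) = x :: y :: rest :=
      List.take_append_drop _ _
    refine ⟨?_, ?_, ?_, ?_, ?_⟩
    · have := congrArg List.length htd
      simp only [List.length_append] at this
      omega
    · rw [← List.sum_append, ← List.map_append, htd]
    · rw [← List.sum_append, ← List.map_append, htd]
    · rw [← pvMaxO_append, ← List.map_append, htd]
    · rw [← pvMaxO_append, ← List.map_append, htd]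

-- A's loop from a some-maxima state
theorem pvFold_some (l : List (List (String × Int))) (t1 t2 mp mo : Int) :
    l.foldl
      (fun (st : Int × Int × Option Int × Option Int) m =>
        let p := pvGetTok m "prompt_len_tokens"
        let o := pvGetTok m "output_len_tokens"
        (st.1 + p, st.2.1 + o,
         match st.2.2.1 with | none => some p | some mp => some (max mp p),
         match st.2.2.2 with | none => some o | some mo => some (max mo o)))
      (t1, t2, some mp, some mo)
    = (t1 + (l.map pvP).sum, t2 + (l.map pvO).sum,
       some ((l.map pvP).foldl max mp),
       some ((l.map pvO).foldl max mo)) := by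
  induction l generalizing t1 t2 mp mo with
  | nil => simp
  | cons m rest ih => simp [List.foldl_cons, ih, pvP, pvO]; omega

-- ===== VERDICT (by name: the statement is the Claim_ definition above) =====
theorem aggregate_generation_stats_per_question_spec : Claim_equal_aggregate_generation_stats_per_question := by
  intro meta_list _
  unfold Spec_aggregate_generation_stats_per_question
  cases meta_list with
  | nil => simp [aggregate_generation_stats_per_question,
      aggregate_generation_stats_per_question_alt, pvStats]
  | cons m rest =>
    simp only [aggregate_generation_stats_per_question,
      aggregate_generation_stats_per_question_alt, List.foldl_cons, pvStats_char,
      pvFold_some, pvMaxO, List.map_cons, List.sum_cons, pvP, pvO]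
    simp
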